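-- pv_equiv track=rewrite | github.com/rblis/leetcode | problems/Matching_String_Suffix.py | matchingSuffixPairs
-- ===== SOURCE A (Python) =====
-- import collections
--
-- class TrieNode:
--     def __init__(self) -> None:
--         self.links = {}
--         self.end = False
--
-- def matchingSuffixPairs(words: list[str]) -> int:
--     head = TrieNode()
--     temp = head
--     dic = collections.defaultdict(int)
--     for i,word in enumerate(words):
--         temp = head
--         dic[word] += 1
--         for i in range(len(word)-1,-1,-1):
--             c = word[i]
--             if c not in temp.links:
--                 temp.links[c] = TrieNode()
--             temp = temp.links[c]
--         temp.end = True
--     temp = head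
--     ans = 0
--     for word in words:
--         temp = head
--         cur = ''
--         for i in range(len(word)-1,-1,-1):
--             c = word[i]
--             cur = c + cur
--             if c in temp.links:
--                 temp = temp.links[c]
--             else:
--                 break
--             if temp.end:
--                 if cur == word:
--                     ans += dic[cur] -1
--                     if dic[cur] > 1: dic[cur] -= 1
--                 else:
--                     ans += dic[cur]
--     return ans
-- ===== SOURCE B (Python) =====
-- def matchingSuffixPairs(words: list[str]) -> int:
--     # No trie: count the words once, then test each proper/full suffix directly
--     # against the count dictionary (same order-dependent decrement as the original).
--     dic = {}
--     for w in words: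
--         dic[w] = dic.get(w, 0) + 1
--     ans = 0
--     for word in words:
--         cur = ''
--         for c in reversed(word):
--             cur = c + cur
--             if cur in dic:
--                 n = dic[cur]
--                 if cur == word:
--                     ans += n - 1
--                     if n > 1:
--                         dic[cur] = n - 1
--                 else:
--                     ans += n
--     return ans
-- ===== Notes on version B (the rewrite author's own statement) =====
-- stated objective: simpler
-- what changed: Drops the reversed-character trie (TrieNode objects, link maps, end flags) entirely: B counts the words in a dict once and then tests each suffix of each word by direct dictionary membership, keeping the same processing order and in-place decrement.
import Mathlib
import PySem

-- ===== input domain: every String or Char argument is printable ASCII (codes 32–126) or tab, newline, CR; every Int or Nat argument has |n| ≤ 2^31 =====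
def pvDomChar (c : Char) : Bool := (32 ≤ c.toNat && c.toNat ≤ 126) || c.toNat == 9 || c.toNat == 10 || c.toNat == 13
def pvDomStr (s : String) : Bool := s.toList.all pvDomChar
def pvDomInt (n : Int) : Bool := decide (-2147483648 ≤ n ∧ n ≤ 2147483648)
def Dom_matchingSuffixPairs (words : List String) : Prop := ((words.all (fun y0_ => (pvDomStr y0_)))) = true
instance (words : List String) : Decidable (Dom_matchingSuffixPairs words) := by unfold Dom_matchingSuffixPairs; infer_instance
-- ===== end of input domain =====

-- B drops A's reversed-character trie and tests each suffix directly against the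
-- word-count dictionary (same order and in-place decrement); proved equal on all inputs.

-- ===== PORT A =====
-- A's trie of TrieNode objects is encoded as a finite map from the node's path
-- from the root (the chars followed) to its `end` flag; the `temp` pointer is the
-- current path. `for i in range(len(word)-1,-1,-1): c = word[i]` is rendered as
-- structural recursion over `word.toList.reverse` (the same characters in the same
-- order); dict keys are the words as `List Char` (Python str keys, exactly).

-- inner insertion loop of A's first `for` (walks/creates nodes for word reversed)
def pvInsSuf (nodes : PySem.Dict (List Char) Bool) (path : List Char) (rest : List Char) :
    PySem.Dict (List Char) Bool × List Char :=
  match rest with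
  | [] => (nodes, path)
  | c :: rest =>
    let p := path ++ [c]
    let nodes := if (nodes.get? p).isSome then nodes else nodes.insert p false
    pvInsSuf nodes p rest

-- one iteration of A's first loop: dic[word] += 1, walk/create, temp.end = True
def pvBuild (st : PySem.Dict (List Char) Bool × PySem.Dict (List Char) Int) (word : String) :
    PySem.Dict (List Char) Bool × PySem.Dict (List Char) Int :=
  let dic := st.2.insert word.toList (st.2.getD word.toList 0 + 1)
  let np := pvInsSuf st.1 [] word.toList.reverse
  (np.1.insert np.2 true, dic)

-- inner loop of A's second `for` (walk with break; end hits update ans/dic)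
def pvQueryA (nodes : PySem.Dict (List Char) Bool) (wordL : List Char)
    (rest : List Char) (path cur : List Char) (ans : Int)
    (dic : PySem.Dict (List Char) Int) : Int × PySem.Dict (List Char) Int :=
  match rest with
  | [] => (ans, dic)
  | c :: rest =>
    let cur := c :: cur
    match nodes.get? (path ++ [c]) with
    | none => (ans, dic)          -- break
    | some e =>
      if e then
        if cur = wordL then
          let n := dic.getD cur 0
          pvQueryA nodes wordL rest (path ++ [c]) cur (ans + n - 1)
            (if n > 1 then dic.insert cur (n - 1) else dic)
        else
          pvQueryA nodes wordL rest (path ++ [c]) cur (ans + dic.getD cur 0) dic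
      else
        pvQueryA nodes wordL rest (path ++ [c]) cur ans dic

def matchingSuffixPairs (words : List String) : Int :=
  let nd := words.foldl pvBuild (PySem.Dict.empty, PySem.Dict.empty)
  (words.foldl
    (fun (st : Int × PySem.Dict (List Char) Int) word =>
      pvQueryA nd.1 word.toList word.toList.reverse [] [] st.1 st.2)
    (0, nd.2)).1

-- ===== PORT B =====
-- inner loop of B: cur = c + cur; if cur in dic: …  (no trie, no break)
def pvQueryB (wordL : List Char) (rest cur : List Char) (ans : Int)
    (dic : PySem.Dict (List Char) Int) : Int × PySem.Dict (List Char) Int :=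
  match rest with
  | [] => (ans, dic)
  | c :: rest =>
    let cur := c :: cur
    match dic.get? cur with
    | none => pvQueryB wordL rest cur ans dic
    | some n =>
      if cur = wordL then
        pvQueryB wordL rest cur (ans + n - 1)
          (if n > 1 then dic.insert cur (n - 1) else dic)
      else
        pvQueryB wordL rest cur (ans + n) dic

def matchingSuffixPairs_alt (words : List String) : Int :=
  let dic := words.foldl
    (fun (d : PySem.Dict (List Char) Int) w => d.insert w.toList (d.getD w.toList 0 + 1))
    PySem.Dict.empty
  (words.foldl
    (fun (st : Int × PySem.Dict (List Char) Int) word =>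
      pvQueryB word.toList word.toList.reverse [] st.1 st.2)
    (0, dic)).1

-- ===== PRECONDITION & SPEC =====
def Spec_matchingSuffixPairs (words : List String) (out : Int) : Prop := out = matchingSuffixPairs_alt words
instance (words : List String) (out : Int) : Decidable (Spec_matchingSuffixPairs words out) := by unfold Spec_matchingSuffixPairs; infer_instance

-- ===== CLAIM (what is proved, stated in full; the proofs are below) =====
def Claim_equal_matchingSuffixPairs : Prop := ∀ (words : List String), Dom_matchingSuffixPairs words → Spec_matchingSuffixPairs words (matchingSuffixPairs words)

-- ===== LEMMAS AND PROOFS =====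

-- s is (as List Char) one of the words / a suffix of one of the words
def pvWrd (s : List Char) (ws : List String) : Bool := ws.any (fun w => w.toList == s)
def pvSuf (s : List Char) (ws : List String) : Bool := ws.any (fun w => s.isSuffixOf w.toList)

lemma pvWrd_imp_pvSuf {s : List Char} {ws : List String} (h : pvWrd s ws = true) :
    pvSuf s ws = true := by
  simp only [pvWrd, pvSuf, List.any_eq_true] at *
  obtain ⟨w, hw, he⟩ := h
  exact ⟨w, hw, by simp [List.isSuffixOf_iff_suffix, (beq_iff_eq.mp he ▸ List.suffix_refl _ : s <:+ w.toList)]⟩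

lemma pvSuf_cons_false {c : Char} {s : List Char} {ws : List String}
    (h : pvSuf s ws = false) : pvSuf (c :: s) ws = false := by
  simp only [pvSuf, List.any_eq_false] at *
  intro w hw
  simp only [List.isSuffixOf_iff_suffix] at *
  intro hsuf
  exact h w hw ((List.suffix_cons c s).trans hsuf)

lemma pvWrd_self {w : String} {ws : List String} (h : w ∈ ws) :
    pvWrd w.toList ws = true := by
  simp only [pvWrd, List.any_eq_true]
  exact ⟨w, h, by simp⟩

-- second component of pvInsSuf
lemma pvInsSuf_snd (N : PySem.Dict (List Char) Bool) (path rest : List Char) :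
    (pvInsSuf N path rest).2 = path ++ rest := by
  induction rest generalizing N path with
  | nil => simp [pvInsSuf]
  | cons c rest ih => simp [pvInsSuf, ih]

-- keys not of the form path ++ (nonempty prefix of rest) are untouched
lemma pvInsSuf_get?_untouched (N : PySem.Dict (List Char) Bool) (path rest q : List Char)
    (h : ∀ r, r ≠ [] → r <+: rest → q ≠ path ++ r) :
    (pvInsSuf N path rest).1.get? q = N.get? q := by
  induction rest generalizing N path with
  | nil => simp [pvInsSuf]
  | cons c rest ih =>
    simp only [pvInsSuf]
    have hq : q ≠ path ++ [c] := h [c] (by simp) ⟨rest, rfl⟩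
    have h' : ∀ r, r ≠ [] → r <+: rest → q ≠ (path ++ [c]) ++ r := by
      intro r hr hpre
      have := h (c :: r) (by simp) (List.cons_prefix_cons.mpr ⟨rfl, hpre⟩)
      simpa [List.append_assoc] using this
    rw [ih _ _ h']
    split
    · rfl
    · exact PySem.Dict.get?_insert_of_ne _ _ hq

-- touched keys end up with their old value (default false)
lemma pvInsSuf_get?_touched (N : PySem.Dict (List Char) Bool) (path rest r : List Char)
    (hr : r ≠ []) (hpre : r <+: rest) :
    (pvInsSuf N path rest).1.get? (path ++ r) = some (N.getD (path ++ r) false) := by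
  induction rest generalizing N path r with
  | nil => exact absurd (List.prefix_nil.mp hpre) hr
  | cons c rest ih =>
    obtain ⟨r', rfl, hpre'⟩ : ∃ r', r = c :: r' ∧ r' <+: rest := by
      cases r with
      | nil => exact absurd rfl hr
      | cons a r' =>
        obtain ⟨t, ht⟩ := hpre
        injection ht with h1 h2
        exact ⟨r', by rw [h1], ⟨t, h2⟩⟩
    simp only [pvInsSuf]
    set N' := if (N.get? (path ++ [c])).isSome then N else N.insert (path ++ [c]) false with hN'
    have hgetc : N'.get? (path ++ [c]) = some (N.getD (path ++ [c]) false) := by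
      rw [hN']
      rcases hg : N.get? (path ++ [c]) with _ | v
      · simp [PySem.Dict.get?_insert_self, PySem.Dict.getD_of_get?_eq_none N false hg]
      · simp [hg, PySem.Dict.getD_of_get?_eq_some N false hg]
    cases r' with
    | nil =>
      have hu : (pvInsSuf N' (path ++ [c]) rest).1.get? (path ++ [c])
          = N'.get? (path ++ [c]) := by
        apply pvInsSuf_get?_untouched
        intro r hrne hrpre hq
        have : (path ++ [c]).length = ((path ++ [c]) ++ r).length := by rw [← hq]
        simp at this
        exact hrne this
      exact hu.trans hgetc
    | cons b r' =>
      have : path ++ (c :: b :: r') = (path ++ [c]) ++ (b :: r') := by simp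
      rw [this, ih N' (path ++ [c]) (b :: r') (by simp) hpre']
      congr 1
      rw [hN']
      rcases hg : N.get? (path ++ [c]) with _ | v
      · simp only [Option.isSome_none, Bool.false_eq_true, if_false]
        rw [PySem.Dict.getD_insert_of_ne]
        intro hq
        have : ((path ++ [c]) ++ (b :: r')).length = (path ++ [c]).length := by rw [hq]
        simp at this
      · simp

-- trie characterisation: a node path is the reverse of a nonempty suffix s of some
-- word, and its end flag says whether s itself is a word
def pvInv (N : PySem.Dict (List Char) Bool) (ws : List String) : Prop :=
  ∀ s : List Char, s ≠ [] →
    N.get? s.reverse = if pvSuf s ws then some (pvWrd s ws) else none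

lemma pvBuild_step {N : PySem.Dict (List Char) Bool} {done : List String}
    (d : PySem.Dict (List Char) Int) (w : String) (hInv : pvInv N done) :
    pvInv (pvBuild (N, d) w).1 (done ++ [w]) := by
  intro s hs
  have hfst : (pvBuild (N, d) w).1
      = (pvInsSuf N [] w.toList.reverse).1.insert w.toList.reverse true := by
    simp [pvBuild, pvInsSuf_snd]
  rw [hfst]
  have hsufApp : pvSuf s (done ++ [w]) = (pvSuf s done || s.isSuffixOf w.toList) := by
    simp [pvSuf]
  have hwrdApp : pvWrd s (done ++ [w]) = (pvWrd s done || w.toList == s) := by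
    simp [pvWrd]
  by_cases hsw : s = w.toList
  · have h1 : pvSuf s (done ++ [w]) = true := by
      rw [hsufApp, hsw]
      simp [List.isSuffixOf_iff_suffix]
    have h2 : pvWrd s (done ++ [w]) = true := by
      rw [hwrdApp, hsw]
      simp
    rw [hsw, PySem.Dict.get?_insert_self, ← hsw, h1, h2, if_pos rfl]
  · have hne : s.reverse ≠ w.toList.reverse := fun h => hsw (List.reverse_inj.mp h)
    rw [PySem.Dict.get?_insert_of_ne _ _ hne]
    by_cases hsuf : s <:+ w.toList
    · have hpre : s.reverse <+: w.toList.reverse := List.reverse_prefix.mpr hsuf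
      have := pvInsSuf_get?_touched N [] w.toList.reverse s.reverse
        (by simpa using hs) hpre
      rw [List.nil_append] at this
      rw [this]
      have hgetD : N.getD s.reverse false
          = (if pvSuf s done then pvWrd s done else false) := by
        rcases h : pvSuf s done with _ | _
        · simp [PySem.Dict.getD_of_get?_eq_none _ _ (by rw [hInv s hs, h]; rfl)]
        · simp [PySem.Dict.getD_of_get?_eq_some _ _ (by rw [hInv s hs, h]; rfl)]
      have h1 : pvSuf s (done ++ [w]) = true := by
        simp [hsufApp, List.isSuffixOf_iff_suffix, hsuf]
      have h2 : pvWrd s (done ++ [w]) = pvWrd s done := by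
        simp [hwrdApp, (by simpa [eq_comm] using hsw : ¬ w.toList = s)]
      rw [h1, if_pos rfl, h2, hgetD]
      rcases h : pvSuf s done with _ | _
      · rcases hw : pvWrd s done with _ | _
        · simp
        · exact absurd (pvWrd_imp_pvSuf hw) (by simp [h])
      · simp
    · have huntouched : (pvInsSuf N [] w.toList.reverse).1.get? s.reverse
          = N.get? s.reverse := by
        apply pvInsSuf_get?_untouched
        intro r hrne hrpre hq
        rw [List.nil_append] at hq
        subst hq
        exact hsuf (List.reverse_prefix.mp hrpre)
      rw [huntouched, hInv s hs]
      have h1 : pvSuf s (done ++ [w]) = pvSuf s done := by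
        simp [hsufApp, List.isSuffixOf_iff_suffix, hsuf]
      have h2 : pvWrd s (done ++ [w]) = pvWrd s done := by
        simp [hwrdApp, (by simpa [eq_comm] using hsw : ¬ w.toList = s)]
      rw [h1, h2]

lemma pvBuild_fold (ws : List String) :
    ∀ (done : List String) (N : PySem.Dict (List Char) Bool)
      (d : PySem.Dict (List Char) Int), pvInv N done →
      pvInv ((ws.foldl pvBuild (N, d)).1) (done ++ ws) := by
  induction ws with
  | nil => intro done N d h; simpa using h
  | cons w ws ih =>
    intro done N d h
    have step := pvBuild_step d w h
    have : (done ++ [w]) ++ ws = done ++ w :: ws := by simp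
    rw [← this]
    have := ih (done ++ [w]) (pvBuild (N, d) w).1 (pvBuild (N, d) w).2 step
    simpa using this

lemma pvBuild_nodes (ws : List String) :
    pvInv ((ws.foldl pvBuild (PySem.Dict.empty, PySem.Dict.empty)).1) ws := by
  have := pvBuild_fold ws [] PySem.Dict.empty PySem.Dict.empty
    (by intro s hs; simp [pvSuf])
  simpa using this

-- the dic built inside A's first loop is exactly B's counting fold
lemma pvBuild_snd (ws : List String) :
    ∀ (N : PySem.Dict (List Char) Bool) (d : PySem.Dict (List Char) Int),
      (ws.foldl pvBuild (N, d)).2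
        = ws.foldl (fun d w => d.insert w.toList (d.getD w.toList 0 + 1)) d := by
  induction ws with
  | nil => intro N d; rfl
  | cons w ws ih => intro N d; simpa [pvBuild] using ih _ _

-- key-set invariant of dic: exactly the words (decrement never deletes a key)
def pvK (dic : PySem.Dict (List Char) Int) (ws : List String) : Prop :=
  ∀ k, (dic.get? k).isSome = pvWrd k ws

lemma pvK_init (ws : List String) :
    ∀ (d : PySem.Dict (List Char) Int) (k : List Char),
      ((ws.foldl (fun d w => d.insert w.toList (d.getD w.toList 0 + 1)) d).get? k).isSome
        = (pvWrd k ws || (d.get? k).isSome) := by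
  induction ws with
  | nil => intro d k; simp [pvWrd]
  | cons w ws ih =>
    intro d k
    rw [List.foldl_cons, ih]
    have : pvWrd k (w :: ws) = (w.toList == k || pvWrd k ws) := by simp [pvWrd]
    rw [this, PySem.Dict.get?_insert]
    by_cases h : k = w.toList
    · simp [h]
    · have hb : (w.toList == k) = false := beq_eq_false_iff_ne.mpr (fun e => h e.symm)
      rw [if_neg h, hb]
      cases pvWrd k ws <;> simp

lemma pvK_insert {dic : PySem.Dict (List Char) Int} {ws : List String}
    (hK : pvK dic ws) {k : List Char} (hk : pvWrd k ws = true) (v : Int) :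
    pvK (dic.insert k v) ws := by
  intro q
  rw [PySem.Dict.get?_insert]
  by_cases h : q = k
  · simp [h, hk]
  · simp [h, hK q]

-- once cur is a suffix of no word, B's remaining iterations change nothing
lemma pvQueryB_none {ws : List String} (wordL : List Char) :
    ∀ (rest cur : List Char) (ans : Int) (dic : PySem.Dict (List Char) Int),
      pvK dic ws → pvSuf cur ws = false →
      pvQueryB wordL rest cur ans dic = (ans, dic) := by
  intro rest
  induction rest with
  | nil => intro cur ans dic _ _; rfl
  | cons c rest ih =>
    intro cur ans dic hK hsuf
    have hsuf' : pvSuf (c :: cur) ws = false := pvSuf_cons_false hsuf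
    have hwrd : pvWrd (c :: cur) ws = false := by
      rcases h : pvWrd (c :: cur) ws with _ | _
      · rfl
      · exact absurd (pvWrd_imp_pvSuf h) (by simp [hsuf'])
    have hget : dic.get? (c :: cur) = none := by
      have := hK (c :: cur)
      rw [hwrd] at this
      exact Option.not_isSome_iff_eq_none.mp (by simp [this])
    simp only [pvQueryB, hget]
    exact ih _ _ _ hK hsuf'

-- main inner-loop equivalence: A's trie walk = B's dictionary scan
lemma pvQueryAB {N : PySem.Dict (List Char) Bool} {ws : List String}
    (hInv : pvInv N ws) (wordL : List Char) (hw : pvWrd wordL ws = true) :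
    ∀ (rest cur : List Char) (ans : Int) (dic : PySem.Dict (List Char) Int),
      pvK dic ws →
      pvQueryA N wordL rest cur.reverse cur ans dic = pvQueryB wordL rest cur ans dic
      ∧ pvK (pvQueryB wordL rest cur ans dic).2 ws := by
  intro rest
  induction rest with
  | nil => intro cur ans dic hK; exact ⟨rfl, hK⟩
  | cons c rest ih =>
    intro cur ans dic hK
    have hrev : cur.reverse ++ [c] = (c :: cur).reverse := by simp
    have hInvc := hInv (c :: cur) (by simp)
    rcases hsuf : pvSuf (c :: cur) ws with _ | _
    · -- break in A; B's tail does nothing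
      rw [hsuf, if_neg (by simp)] at hInvc
      have hwrd : pvWrd (c :: cur) ws = false := by
        rcases h : pvWrd (c :: cur) ws with _ | _
        · rfl
        · exact absurd (pvWrd_imp_pvSuf h) (by simp [hsuf])
      have hget : dic.get? (c :: cur) = none := by
        have := hK (c :: cur)
        rw [hwrd] at this
        exact Option.not_isSome_iff_eq_none.mp (by simp [this])
      have hB := pvQueryB_none wordL rest (c :: cur) ans dic hK hsuf
      simp only [pvQueryA, pvQueryB, hrev, hInvc, hget]
      exact ⟨hB.symm, by rw [hB]; exact hK⟩
    · rw [hsuf, if_pos rfl] at hInvc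
      rcases hwrd : pvWrd (c :: cur) ws with _ | _ <;> rw [hwrd] at hInvc
      · -- node exists but is not an end: B's lookup misses too
        have hget : dic.get? (c :: cur) = none := by
          have := hK (c :: cur)
          rw [hwrd] at this
          exact Option.not_isSome_iff_eq_none.mp (by simp [this])
        simp only [pvQueryA, pvQueryB, hrev, hInvc, hget, Bool.false_eq_true, if_false]
        exact ih (c :: cur) ans dic hK
      · -- end node: B finds the word in dic
        obtain ⟨n, hget⟩ : ∃ n, dic.get? (c :: cur) = some n := by
          have := hK (c :: cur)
          rw [hwrd] at this
          exact Option.isSome_iff_exists.mp this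
        have hgetD : dic.getD (c :: cur) 0 = n := PySem.Dict.getD_of_get?_eq_some _ _ hget
        simp only [pvQueryA, pvQueryB, hrev, hInvc, hget, hgetD, if_pos]
        by_cases hcw : c :: cur = wordL
        · rw [if_pos hcw, if_pos hcw]
          have hK' : pvK (if n > 1 then dic.insert (c :: cur) (n - 1) else dic) ws := by
            split
            · exact pvK_insert hK (hcw ▸ hw) _
            · exact hK
          exact ih (c :: cur) (ans + n - 1) _ hK'
        · rw [if_neg hcw, if_neg hcw]
          exact ih (c :: cur) (ans + n) dic hK

-- outer fold equivalence
lemma pvFoldAB {N : PySem.Dict (List Char) Bool} {ws : List String}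
    (hInv : pvInv N ws) :
    ∀ (ls : List String) (st : Int × PySem.Dict (List Char) Int),
      (∀ w ∈ ls, w ∈ ws) → pvK st.2 ws →
      ls.foldl (fun st word => pvQueryA N word.toList word.toList.reverse [] [] st.1 st.2) st
        = ls.foldl (fun st word => pvQueryB word.toList word.toList.reverse [] st.1 st.2) st
      ∧ pvK (ls.foldl (fun st word => pvQueryB word.toList word.toList.reverse [] st.1 st.2) st).2 ws := by
  intro ls
  induction ls with
  | nil => intro st _ hK; exact ⟨rfl, hK⟩
  | cons w ls ih =>
    intro st hmem hK
    have hw : pvWrd w.toList ws = true := pvWrd_self (hmem w (by simp))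
    have hq := pvQueryAB hInv w.toList hw w.toList.reverse [] st.1 st.2 hK
    rw [List.foldl_cons, List.foldl_cons]
    rw [show pvQueryA N w.toList w.toList.reverse [] [] st.1 st.2
        = pvQueryB w.toList w.toList.reverse [] st.1 st.2 from hq.1]
    exact ih _ (fun v hv => hmem v (by simp [hv])) hq.2

-- ===== VERDICT (by name: the statement is the Claim_ definition above) =====
theorem matchingSuffixPairs_spec : Claim_equal_matchingSuffixPairs := by
  intro words _
  unfold Spec_matchingSuffixPairs matchingSuffixPairs matchingSuffixPairs_alt
  have hInv := pvBuild_nodes words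
  have hdic := pvBuild_snd words PySem.Dict.empty PySem.Dict.empty
  have hK : pvK (words.foldl pvBuild (PySem.Dict.empty, PySem.Dict.empty)).2 words := by
    intro k
    rw [hdic, pvK_init words PySem.Dict.empty k]
    simp
  have := pvFoldAB hInv words
    (0, (words.foldl pvBuild (PySem.Dict.empty, PySem.Dict.empty)).2)
    (fun w hw => hw) hK
  simp only at this ⊢
  rw [← hdic, this.1]
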